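-- pv_equiv track=rewrite | github.com/harjassand/AGI-Stack-Unchained | CDEL-v2/cdel/v19_0/federation/check_treaty_v1.py | _decode_json_pointer
-- ===== SOURCE A (Python) =====
-- def _decode_json_pointer(pointer: str) -> list[str]:
--     if pointer == "":
--         return []
--     if not pointer.startswith("/"):
--         raise KeyError("json-pointer")
--     out = []
--     for token in pointer[1:].split("/"):
--         out.append(token.replace("~1", "/").replace("~0", "~"))
--     return out
-- ===== SOURCE B (Python) =====
-- def _decode_json_pointer(pointer: str) -> list[str]:
--     if pointer == "":
--         return []
--     if not pointer.startswith("/"):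
--         raise KeyError("json-pointer")
--     tokens = []
--     buf = []
--     i = 1
--     n = len(pointer)
--     while i < n:
--         c = pointer[i]
--         if c == "/":
--             tokens.append("".join(buf))
--             buf = []
--         elif c == "~" and i + 1 < n and pointer[i + 1] == "0":
--             buf.append("~")
--             i += 1
--         elif c == "~" and i + 1 < n and pointer[i + 1] == "1":
--             buf.append("/")
--             i += 1
--         else:
--             buf.append(c)
--         i += 1
--     tokens.append("".join(buf))
--     return tokens
-- ===== Notes on version B (the rewrite author's own statement) =====
-- stated objective: alternative
-- what changed: Replaces split('/') followed by two sequential str.replace passes per token with a single left-to-right scan over pointer[1:] that maintains a token buffer and decodes ~0/~1 by one-character lookahead.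
import Mathlib
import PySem

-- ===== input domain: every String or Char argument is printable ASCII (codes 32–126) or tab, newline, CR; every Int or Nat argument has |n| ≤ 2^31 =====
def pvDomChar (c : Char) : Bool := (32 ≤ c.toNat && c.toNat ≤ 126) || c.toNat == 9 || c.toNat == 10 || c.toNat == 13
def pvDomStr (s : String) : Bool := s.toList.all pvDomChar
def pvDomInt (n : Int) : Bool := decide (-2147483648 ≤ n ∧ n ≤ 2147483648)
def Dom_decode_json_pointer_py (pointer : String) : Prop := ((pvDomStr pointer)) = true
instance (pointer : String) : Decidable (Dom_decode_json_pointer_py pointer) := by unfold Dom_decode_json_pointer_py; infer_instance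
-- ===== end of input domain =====

-- B replaces split + two sequential str.replace passes with a single left-to-right scan
-- maintaining a token buffer (alternative decomposition, same linear cost).
-- Equivalence is about the return value; on nonempty inputs not starting with "/" Python A
-- raises KeyError and B raises the same, excluded by Pre_.

-- ===== PORT A =====
def decode_json_pointer_py (pointer : String) : List String :=
  if pointer = "" then []
  else if PySem.Str.startswith pointer "/" = false then []  -- Python: raise KeyError("json-pointer"); excluded by Pre_
  else
    match PySem.Str.split? (PySem.Str.slice pointer (some 1) none) "/" with
    | none => []  -- unreachable: separator "/" is nonempty
    | some toks =>
      toks.foldl (fun out token =>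
        out ++ [PySem.Str.replace (PySem.Str.replace token "~1" "/") "~0" "~"]) []

-- ===== PORT B =====
-- the while loop of Source B: buf is the current-token buffer, toks the completed tokens
def pvScanTokens : List Char → List Char → List String → List String
  | [], buf, toks => toks ++ [String.ofList buf]
  | '/' :: rest, buf, toks => pvScanTokens rest [] (toks ++ [String.ofList buf])
  | '~' :: '0' :: rest, buf, toks => pvScanTokens rest (buf ++ ['~']) toks
  | '~' :: '1' :: rest, buf, toks => pvScanTokens rest (buf ++ ['/']) toks
  | c :: rest, buf, toks => pvScanTokens rest (buf ++ [c]) toks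

def decode_json_pointer_py_alt (pointer : String) : List String :=
  if pointer = "" then []
  else if PySem.Str.startswith pointer "/" = false then []  -- raise KeyError("json-pointer"); excluded by Pre_
  else pvScanTokens (pointer.toList.drop 1) [] []

-- ===== PRECONDITION & SPEC =====
-- Pre_ excludes exactly the inputs where A (and B alike) raises KeyError:
-- nonempty strings not starting with "/".
def Pre_decode_json_pointer_py (pointer : String) : Prop :=
  pointer = "" ∨ PySem.Str.startswith pointer "/" = true
instance (pointer : String) : Decidable (Pre_decode_json_pointer_py pointer) := by
  unfold Pre_decode_json_pointer_py; infer_instance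

def pvWitness_decode_json_pointer_py : String := "/a~1b/c~0"

def Spec_decode_json_pointer_py (pointer : String) (out : List String) : Prop :=
  out = decode_json_pointer_py_alt pointer
instance (pointer : String) (out : List String) : Decidable (Spec_decode_json_pointer_py pointer out) := by
  unfold Spec_decode_json_pointer_py; infer_instance

-- ===== CLAIM (what is proved, stated in full; the proofs are below) =====
def Claim_equal_decode_json_pointer_py : Prop :=
  ∀ (pointer : String), Dom_decode_json_pointer_py pointer →
    Pre_decode_json_pointer_py pointer →
    Spec_decode_json_pointer_py pointer (decode_json_pointer_py pointer)

-- ===== LEMMAS AND PROOFS =====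

-- simple structural form of token.replace("~" + x, r) for a two-char pattern '~' x
def pvRepl (x r : Char) : List Char → List Char
  | [] => []
  | '~' :: c :: t => if c = x then r :: pvRepl x r t else '~' :: pvRepl x r (c :: t)
  | c :: t => c :: pvRepl x r t

-- simple structural form of s.split("/")
def pvSplit : List Char → List (List Char)
  | [] => [[]]
  | '/' :: t => [] :: pvSplit t
  | c :: t => (c :: (pvSplit t).headD []) :: (pvSplit t).tail

-- A's per-token decoding: replace "~1"→"/" then "~0"→"~"
def pvDec (t : List Char) : List Char := pvRepl '0' '~' (pvRepl '1' '/' t)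

lemma pvRepl_cons_of_not_pref (x r c : Char) (t : List Char)
    (h : List.isPrefixOf ['~', x] (c :: t) = false) :
    pvRepl x r (c :: t) = c :: pvRepl x r t := by
  rw [pvRepl.eq_def]
  split
  · next heq => simp at heq
  · next heq =>
      injection heq with h1 h2
      subst h1; subst h2
      simp [List.isPrefixOf] at h
      rw [if_neg (fun he => h he.symm)]
  · next heq =>
      injection heq with h1 h2
      subst h1; subst h2
      rfl

lemma pvReplGo_spec (x r : Char) :
    ∀ (fuel : Nat) (l acc : List Char), l.length ≤ fuel →
      PySem.Chars.replace.go ['~', x] [r] fuel l acc = acc.reverse ++ pvRepl x r l := by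
  intro fuel
  induction fuel with
  | zero =>
    intro l acc h
    have : l = [] := List.eq_nil_of_length_eq_zero (Nat.le_zero.mp h)
    subst this
    rw [PySem.Chars.replace.go]; simp [pvRepl]
  | succ n ih =>
    intro l acc h
    match l with
    | [] =>
      rw [PySem.Chars.replace.go]
      simp [pvRepl]
      omega
    | c :: t =>
      by_cases hp : List.isPrefixOf ['~', x] (c :: t) = true
      · -- c = '~', t = x :: t'
        match c, t, hp with
        | c, c2 :: t2, hp =>
          simp only [List.isPrefixOf, Bool.and_eq_true, beq_iff_eq] at hp
          obtain ⟨h1, h2, -⟩ := hp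
          subst h1; subst h2
          rw [PySem.Chars.replace.go]
          simp only [List.isPrefixOf, beq_self_eq_true, Bool.and_self, if_pos]
          have hlen : t2.length ≤ n := by simp at h; omega
          rw [show List.drop (['~', x].length) ('~' :: x :: t2) = t2 from rfl]
          rw [ih t2 ([r].reverse ++ acc) hlen]
          simp [pvRepl]
        | c, [], hp => simp [List.isPrefixOf] at hp
      · rw [PySem.Chars.replace.go]
        simp only [Bool.not_eq_true] at hp
        simp only [hp, Bool.false_eq_true, if_neg, not_false_iff]
        have hlen : t.length ≤ n := by simp at h; omega
        rw [ih t (c :: acc) hlen, pvRepl_cons_of_not_pref x r c t hp]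
        simp

lemma replace_eq_pvRepl (x r : Char) (l : List Char) :
    PySem.Chars.replace l ['~', x] [r] = pvRepl x r l := by
  rw [PySem.Chars.replace]
  simpa using pvReplGo_spec x r l.length l [] le_rfl

lemma pvSplit_ne_nil (l : List Char) : pvSplit l ≠ [] := by
  match l with
  | [] => simp [pvSplit]
  | '/' :: t => simp [pvSplit]
  | c :: t =>
    rw [pvSplit.eq_def]
    split <;> simp_all

lemma pvSplit_cons_of_ne (c : Char) (t : List Char) (h : c ≠ '/') :
    pvSplit (c :: t) = (c :: (pvSplit t).headD []) :: (pvSplit t).tail := by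
  rw [pvSplit.eq_def]
  split
  · next heq => simp at heq
  · next heq =>
      injection heq with h1 h2
      exact absurd h1 h
  · next heq =>
      injection heq with h1 h2
      subst h1; subst h2
      rfl

lemma pvModifyHead_id (l : List (List Char)) : l.modifyHead (fun x => x) = l := by
  cases l <;> simp

lemma pvSplitGo_spec :
    ∀ (fuel : Nat) (l cur : List Char) (acc : List (List Char)), l.length < fuel →
      PySem.Chars.splitOn.go ['/'] fuel l cur acc
        = acc.reverse ++ (pvSplit l).modifyHead (cur.reverse ++ ·) := by
  intro fuel
  induction fuel with
  | zero => intro l cur acc h; omega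
  | succ n ih =>
    intro l cur acc h
    match l with
    | [] =>
      rw [PySem.Chars.splitOn.go]
      simp [pvSplit]
      omega
    | '/' :: t =>
      rw [PySem.Chars.splitOn.go]
      simp only [List.isPrefixOf, beq_self_eq_true, Bool.and_self, if_pos]
      have hlen : t.length < n := by simp at h; omega
      rw [show List.drop (['/'].length) ('/' :: t) = t from rfl]
      rw [ih t [] (cur.reverse :: acc) hlen]
      simp [pvSplit, pvModifyHead_id]
    | c :: t =>
      by_cases hc : c = '/'
      · subst hc
        rw [PySem.Chars.splitOn.go]
        simp only [List.isPrefixOf, beq_self_eq_true, Bool.and_self, if_pos]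
        have hlen : t.length < n := by simp at h; omega
        rw [show List.drop (['/'].length) ('/' :: t) = t from rfl]
        rw [ih t [] (cur.reverse :: acc) hlen]
        simp [pvSplit, pvModifyHead_id]
      · rw [PySem.Chars.splitOn.go]
        have hpref : List.isPrefixOf ['/'] (c :: t) = false := by
          simp [List.isPrefixOf, Ne.symm hc]
        simp only [hpref, Bool.false_eq_true, if_neg, not_false_iff]
        have hlen : t.length < n := by simp at h; omega
        rw [ih t (c :: cur) acc hlen, pvSplit_cons_of_ne c t hc]
        obtain ⟨h0, tl, hsp⟩ : ∃ h0 tl, pvSplit t = h0 :: tl := by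
          cases hsp : pvSplit t with
          | nil => exact absurd hsp (pvSplit_ne_nil t)
          | cons a b => exact ⟨a, b, rfl⟩
        simp [hsp]

lemma splitOn_eq_pvSplit (l : List Char) :
    PySem.Chars.splitOn l ['/'] = pvSplit l := by
  rw [PySem.Chars.splitOn]
  rw [pvSplitGo_spec (l.length + 1) l [] [] (by omega)]
  simp [pvModifyHead_id]

-- pvDec equations
lemma pvDec_nil : pvDec [] = [] := rfl

lemma pvDec_tilde0 (t : List Char) : pvDec ('~' :: '0' :: t) = '~' :: pvDec t := by
  unfold pvDec
  rw [show pvRepl '1' '/' ('~' :: '0' :: t) = '~' :: '0' :: pvRepl '1' '/' t by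
        rw [pvRepl]; simp [pvRepl_cons_of_not_pref '1' '/' '0' t (by simp [List.isPrefixOf])]]
  rw [show pvRepl '0' '~' ('~' :: '0' :: pvRepl '1' '/' t) = '~' :: pvRepl '0' '~' (pvRepl '1' '/' t) by
        rw [pvRepl]; simp]

lemma pvDec_tilde1 (t : List Char) : pvDec ('~' :: '1' :: t) = '/' :: pvDec t := by
  unfold pvDec
  rw [show pvRepl '1' '/' ('~' :: '1' :: t) = '/' :: pvRepl '1' '/' t by rw [pvRepl]; simp]
  exact pvRepl_cons_of_not_pref '0' '~' '/' _ (by simp [List.isPrefixOf])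

lemma pvRepl_cons_of_head_ne (x r c : Char) (t : List Char) (h : c ≠ '~') :
    pvRepl x r (c :: t) = c :: pvRepl x r t :=
  pvRepl_cons_of_not_pref x r c t (by simp [List.isPrefixOf, Ne.symm h])

lemma pvDec_cons_of_ne (c : Char) (t : List Char) (h : c ≠ '~') :
    pvDec (c :: t) = c :: pvDec t := by
  unfold pvDec
  rw [pvRepl_cons_of_head_ne '1' '/' c t h, pvRepl_cons_of_head_ne '0' '~' c _ h]

-- the head of pvRepl '1' '/' (c :: t) is c or '/'
lemma pvRepl1_head (c : Char) (t : List Char) :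
    ∃ h tl, pvRepl '1' '/' (c :: t) = h :: tl ∧ (h = c ∨ h = '/') := by
  by_cases hc : c = '~'
  · subst hc
    match t with
    | [] => exact ⟨'~', [], rfl, Or.inl rfl⟩
    | c2 :: t2 =>
      by_cases h2 : c2 = '1'
      · subst h2
        refine ⟨'/', pvRepl '1' '/' t2, ?_, Or.inr rfl⟩
        rw [pvRepl]; simp
      · refine ⟨'~', pvRepl '1' '/' (c2 :: t2), ?_, Or.inl rfl⟩
        rw [pvRepl]; simp [h2]
  · exact ⟨c, pvRepl '1' '/' t, pvRepl_cons_of_head_ne '1' '/' c t hc, Or.inl rfl⟩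

lemma pvDec_single_tilde : pvDec ['~'] = ['~'] := rfl

lemma pvDec_tilde_cons (c : Char) (t : List Char) (h0 : c ≠ '0') (h1 : c ≠ '1') :
    pvDec ('~' :: c :: t) = '~' :: pvDec (c :: t) := by
  unfold pvDec
  have hr1 : pvRepl '1' '/' ('~' :: c :: t) = '~' :: pvRepl '1' '/' (c :: t) := by
    rw [pvRepl]; simp [h1]
  rw [hr1]
  obtain ⟨h, tl, heq, hor⟩ := pvRepl1_head c t
  rw [heq]
  have hne0 : ¬ h = '0' := by
    rcases hor with rfl | rfl
    · exact h0
    · simp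
  rw [show pvRepl '0' '~' ('~' :: h :: tl) = '~' :: pvRepl '0' '~' (h :: tl) by
        rw [pvRepl]; simp [hne0]]

-- main loop invariant for B's scanner
lemma pvScanTokens_spec :
    ∀ (cs buf : List Char) (toks : List String),
      pvScanTokens cs buf toks
        = toks ++ (((pvSplit cs).map pvDec).modifyHead (buf ++ ·)).map String.ofList := by
  intro cs buf toks
  fun_induction pvScanTokens cs buf toks with
  | case1 buf toks => simp [pvSplit, pvDec_nil]
  | case2 rest buf toks ih =>
    rw [ih]
    simp only [pvSplit, List.map_cons, pvDec_nil, List.modifyHead_cons, List.map_cons]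
    simp [pvModifyHead_id]
  | case3 rest buf toks ih =>
    rw [ih, pvSplit_cons_of_ne '~' ('0' :: rest) (by decide),
        pvSplit_cons_of_ne '0' rest (by decide)]
    obtain ⟨h0, tl, hsp⟩ : ∃ h0 tl, pvSplit rest = h0 :: tl := by
      cases hsp : pvSplit rest with
      | nil => exact absurd hsp (pvSplit_ne_nil rest)
      | cons a b => exact ⟨a, b, rfl⟩
    simp [hsp, pvDec_tilde0]
  | case4 rest buf toks ih =>
    rw [ih, pvSplit_cons_of_ne '~' ('1' :: rest) (by decide),
        pvSplit_cons_of_ne '1' rest (by decide)]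
    obtain ⟨h0, tl, hsp⟩ : ∃ h0 tl, pvSplit rest = h0 :: tl := by
      cases hsp : pvSplit rest with
      | nil => exact absurd hsp (pvSplit_ne_nil rest)
      | cons a b => exact ⟨a, b, rfl⟩
    simp [hsp, pvDec_tilde1]
  | case5 c rest buf toks h1 h2 h3 ih =>
    -- c :: rest matches none of the earlier patterns
    by_cases hc : c = '~'
    · subst hc
      match rest, h2, h3 with
      | [], _, _ =>
        rw [ih, pvSplit_cons_of_ne '~' [] (by decide)]
        simp [pvSplit, pvDec_single_tilde, pvDec_nil]
      | c2 :: t2, h2, h3 =>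
        have hc20 : c2 ≠ '0' := fun he => h2 t2 rfl (by rw [he])
        have hc21 : c2 ≠ '1' := fun he => h3 t2 rfl (by rw [he])
        rw [ih, pvSplit_cons_of_ne '~' (c2 :: t2) (by decide)]
        by_cases hc2s : c2 = '/'
        · subst hc2s
          simp [pvSplit, pvDec_single_tilde, pvDec_nil]
        · rw [pvSplit_cons_of_ne c2 t2 hc2s]
          obtain ⟨h0, tl, hsp⟩ : ∃ h0 tl, pvSplit t2 = h0 :: tl := by
            cases hsp : pvSplit t2 with
            | nil => exact absurd hsp (pvSplit_ne_nil t2)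
            | cons a b => exact ⟨a, b, rfl⟩
          simp [hsp, pvDec_tilde_cons c2 (h0) hc20 hc21]
    · have hcs : c ≠ '/' := h1
      rw [ih, pvSplit_cons_of_ne c rest hcs]
      obtain ⟨h0, tl, hsp⟩ : ∃ h0 tl, pvSplit rest = h0 :: tl := by
        cases hsp : pvSplit rest with
        | nil => exact absurd hsp (pvSplit_ne_nil rest)
        | cons a b => exact ⟨a, b, rfl⟩
      simp [hsp, pvDec_cons_of_ne c h0 hc]

-- ===== VERDICT (by name: the statement is the Claim_ definition above) =====
theorem decode_json_pointer_py_spec : Claim_equal_decode_json_pointer_py := by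
  intro pointer _ hpre
  unfold Spec_decode_json_pointer_py decode_json_pointer_py decode_json_pointer_py_alt
  rcases hpre with hemp | hsw
  · simp [hemp]
  · by_cases hemp : pointer = ""
    · simp [hemp]
    · rw [if_neg hemp, if_neg hemp, hsw]
      simp only [Bool.true_eq_false, if_neg, not_false_iff]
      -- A side: identify split? and the per-token replaces, then close with the scan invariant
      have hsl : (PySem.Str.slice pointer (some 1) none).toList = pointer.toList.drop 1 := by
        simp [PySem.List.slice_from (pointer.toList) (a := (1 : Int)) (by norm_num)]
      obtain ⟨toks, htoks, hmap⟩ : ∃ toks,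
          PySem.Str.split? (PySem.Str.slice pointer (some 1) none) "/" = some toks ∧
          toks.map String.toList = pvSplit (pointer.toList.drop 1) := by
        have h := PySem.Str.split?_map (PySem.Str.slice pointer (some 1) none) "/"
        rw [PySem.Chars.split?] at h
        simp only [show ("/" : String).toList = ['/'] from rfl, List.isEmpty_cons, if_neg,
          Bool.false_eq_true, not_false_iff] at h
        cases hs : PySem.Str.split? (PySem.Str.slice pointer (some 1) none) "/" with
        | none => rw [hs] at h; simp at h
        | some toks =>
          rw [hs] at h; simp only [Option.map_some, Option.some.injEq] at h
          exact ⟨toks, rfl, by rw [h, splitOn_eq_pvSplit, hsl]⟩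
      rw [htoks]
      show toks.foldl (fun out token =>
        out ++ [PySem.Str.replace (PySem.Str.replace token "~1" "/") "~0" "~"]) [] = _
      rw [PySem.List.foldl_append_singleton_eq_map]
      rw [pvScanTokens_spec]
      -- both sides are maps over the same token list
      have htok : ∀ token : String,
          PySem.Str.replace (PySem.Str.replace token "~1" "/") "~0" "~"
            = String.ofList (pvDec token.toList) := by
        intro token
        apply String.toList_inj.mp
        rw [String.toList_ofList]
        rw [PySem.Str.toList_replace, PySem.Str.toList_replace]
        rw [show ("~1" : String).toList = ['~','1'] from rfl,
            show ("/" : String).toList = ['/'] from rfl,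
            show ("~0" : String).toList = ['~','0'] from rfl,
            show ("~" : String).toList = ['~'] from rfl]
        rw [replace_eq_pvRepl, replace_eq_pvRepl]
        rfl
      calc toks.map (fun token => PySem.Str.replace (PySem.Str.replace token "~1" "/") "~0" "~")
          = toks.map (fun token => String.ofList (pvDec token.toList)) := by
            exact List.map_congr_left (fun t _ => htok t)
        _ = ((toks.map String.toList).map pvDec).map String.ofList := by
            simp [List.map_map, Function.comp]
        _ = [] ++ (((pvSplit (pointer.toList.drop 1)).map pvDec).modifyHead
              (([] : List Char) ++ ·)).map String.ofList := by
            rw [hmap]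
            simp [pvModifyHead_id]
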